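-- pv_equiv track=rewrite | github.com/jucollas/Code_University | semester_1/corte-3/tarea6.py | traducir
-- ===== SOURCE A (Python) =====
-- def traducir(d, cad):
-- 	anx = []
-- 	ax1 = cad.split(" ")
-- 	i = 0
-- 	l = len(ax1)
-- 	flag = True
-- 	while i < l and flag:
-- 		if ax1[i] in d:
-- 			anx.append(d[ax1[i]])
-- 		else:
-- 			ans = "impossible"
-- 			flag = False
-- 		i += 1
-- 	if flag:
-- 		ans = " ".join(anx)
--
-- 	return ans
-- ===== SOURCE B (Python) =====
-- def traducir(d, cad):
--     ws = cad.split(" ")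
--     if set(ws) <= d.keys():
--         return " ".join(map(d.__getitem__, ws))
--     return "impossible"
-- ===== Notes on version B (the rewrite author's own statement) =====
-- stated objective: alternative
-- what changed: Replaces A's single early-exit index/flag loop (per-word membership test then append) by two staged passes: a global set-inclusion test set(words) <= d.keys(), and only then a full translation map over all words; no flag, index or early exit is maintained.
import Mathlib
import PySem

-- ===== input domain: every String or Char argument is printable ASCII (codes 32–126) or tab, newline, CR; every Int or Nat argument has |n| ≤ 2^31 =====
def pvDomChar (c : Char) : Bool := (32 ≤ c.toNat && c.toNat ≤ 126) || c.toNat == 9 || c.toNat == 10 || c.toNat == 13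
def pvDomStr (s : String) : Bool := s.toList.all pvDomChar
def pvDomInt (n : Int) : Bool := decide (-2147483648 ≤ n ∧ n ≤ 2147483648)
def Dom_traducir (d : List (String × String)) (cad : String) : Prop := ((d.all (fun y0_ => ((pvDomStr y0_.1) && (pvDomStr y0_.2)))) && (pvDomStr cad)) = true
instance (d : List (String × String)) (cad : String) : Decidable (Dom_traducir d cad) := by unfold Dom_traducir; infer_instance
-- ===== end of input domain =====

-- B replaces A's early-exit index/flag loop by two staged passes: a global
-- set-inclusion test set(words) <= d.keys(), then a full translation map —
-- a different decomposition (no per-word bail-out), same cost.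

-- dict lookup d[w] (first match on the association list); membership 'w in d'
-- is (pvLookup d w).isSome
def pvLookup (d : List (String × String)) (w : String) : Option String :=
  (d.find? (fun p => p.1 == w)).map (·.2)

-- ===== PORT A =====
-- the while-loop: i/l/flag become structural recursion on the word list; anx is
-- the accumulator appended to in loop order; flag=False exits with "impossible"
def traducirLoopA (d : List (String × String)) : List String → List String → String
  | [], anx => PySem.Str.join " " anx
  | w :: rest, anx =>
    match pvLookup d w with
    | some v => traducirLoopA d rest (anx ++ [v])
    | none => "impossible"

def traducir (d : List (String × String)) (cad : String) : String :=
  traducirLoopA d (((PySem.Str.split? cad " ").getD [])) []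

-- ===== PORT B =====
-- Source B: ws = cad.split(" "); if set(ws) <= d.keys(): " ".join(map(d.__getitem__, ws))
-- else "impossible".  The subset guard guarantees every lookup succeeds, so the
-- total getD "" in the map branch computes exactly d[w] there.
def traducir_alt (d : List (String × String)) (cad : String) : String :=
  let ws := ((PySem.Str.split? cad " ").getD [])
  if PySem.Set.issubset (PySem.Set.ofList ws) ((d.map Prod.fst)) then
    PySem.Str.join " " (ws.map (fun w => (pvLookup d w).getD ""))
  else
    "impossible"

-- ===== PRECONDITION & SPEC =====
def Spec_traducir (d : List (String × String)) (cad : String) (out : String) : Prop := out = traducir_alt d cad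
instance (d : List (String × String)) (cad : String) (out : String) : Decidable (Spec_traducir d cad out) := by unfold Spec_traducir; infer_instance

-- ===== CLAIM (what is proved, stated in full; the proofs are below) =====
def Claim_equal_traducir : Prop := ∀ (d : List (String × String)) (cad : String), Dom_traducir d cad → Spec_traducir d cad (traducir d cad)

-- ===== LEMMAS AND PROOFS =====

-- A's loop, when every word is a key, joins the looked-up values in order
theorem traducirLoopA_all_some (d : List (String × String)) (ws : List String)
    (h : ∀ w ∈ ws, (pvLookup d w).isSome) :
    ∀ anx, traducirLoopA d ws anx =
      PySem.Str.join " " (anx ++ ws.map (fun w => (pvLookup d w).getD "")) := by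
  induction ws with
  | nil => intro anx; simp [traducirLoopA]
  | cons w rest ih =>
    intro anx
    have hw := h w (by simp)
    cases hv : pvLookup d w with
    | none => simp [hv] at hw
    | some v =>
      simp only [traducirLoopA, hv]
      rw [ih (fun x hx => h x (by simp [hx]))]
      simp [hv]

-- A's loop returns "impossible" as soon as some word is not a key
theorem traducirLoopA_has_none (d : List (String × String)) (ws : List String)
    (h : ∃ w ∈ ws, pvLookup d w = none) :
    ∀ anx, traducirLoopA d ws anx = "impossible" := by
  induction ws with
  | nil => simp at h
  | cons w rest ih =>
    intro anx
    cases hv : pvLookup d w with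
    | none => simp [traducirLoopA, hv]
    | some v =>
      simp only [traducirLoopA, hv]
      apply ih
      rcases h with ⟨x, hx, hnone⟩
      rcases List.mem_cons.mp hx with rfl | hmem
      · rw [hv] at hnone; exact absurd hnone (by simp)
      · exact ⟨x, hmem, hnone⟩

-- the subset test of B says exactly that every word's lookup succeeds
theorem issubset_iff_lookup (d : List (String × String)) (ws : List String) :
    PySem.Set.issubset (PySem.Set.ofList ws) (d.map Prod.fst) = true ↔
      ∀ w ∈ ws, (pvLookup d w).isSome := by
  rw [PySem.Set.issubset_iff]
  have key : ∀ w : String, w ∈ d.map Prod.fst ↔ (pvLookup d w).isSome := by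
    intro w
    simp [pvLookup, List.find?_isSome, List.mem_map]
  constructor
  · intro h w hw
    exact (key w).mp (h w (by simp [PySem.Set.mem_ofList, hw]))
  · intro h w hw
    exact (key w).mpr (h w (by simpa [PySem.Set.mem_ofList] using hw))

-- ===== VERDICT (by name: the statement is the Claim_ definition above) =====
theorem traducir_spec : Claim_equal_traducir := by
  intro d cad _
  unfold Spec_traducir traducir traducir_alt
  simp only []
  by_cases h : PySem.Set.issubset (PySem.Set.ofList ((PySem.Str.split? cad " ").getD [])) ((d.map Prod.fst)) = true
  · rw [if_pos h, traducirLoopA_all_some d _ ((issubset_iff_lookup d _).mp h)]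
    simp
  · rw [if_neg h]
    apply traducirLoopA_has_none
    rcases not_forall.mp (fun hall => h ((issubset_iff_lookup d _).mpr hall)) with ⟨w, hw⟩
    rw [Classical.not_imp] at hw
    exact ⟨w, hw.1, Option.not_isSome_iff_eq_none.mp hw.2⟩
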